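-- pv_equiv track=rewrite | github.com/kratenko/HIOB | hiob/ev/tb101.py | cnt_updates
-- ===== SOURCE A (Python) =====
-- def cnt_updates(bag):
--     c = 0
--     f = 0
--     for e in bag:
--         u = e['update']
--         if u == 'c':
--             c += 1
--         elif u == 'f':
--             f += 1
--     return c, f
-- ===== SOURCE B (Python) =====
-- def cnt_updates(bag):
--     if not bag:
--         return 0, 0
--     if len(bag) == 1:
--         u = bag[0]['update']
--         return (1 if u == 'c' else 0), (1 if u == 'f' else 0)
--     mid = len(bag) // 2
--     c1, f1 = cnt_updates(bag[:mid])
--     c2, f2 = cnt_updates(bag[mid:])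
--     return c1 + c2, f1 + f2
-- ===== Notes on version B (the rewrite author's own statement) =====
-- stated objective: alternative
-- what changed: Replaces A's single linear pass with two scalar accumulators and if/elif branching by a divide-and-conquer recursion: split the bag in half, count each half recursively, and add the sub-counts (correct because the pair of counts is a monoid homomorphism of list concatenation).
import Mathlib
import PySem

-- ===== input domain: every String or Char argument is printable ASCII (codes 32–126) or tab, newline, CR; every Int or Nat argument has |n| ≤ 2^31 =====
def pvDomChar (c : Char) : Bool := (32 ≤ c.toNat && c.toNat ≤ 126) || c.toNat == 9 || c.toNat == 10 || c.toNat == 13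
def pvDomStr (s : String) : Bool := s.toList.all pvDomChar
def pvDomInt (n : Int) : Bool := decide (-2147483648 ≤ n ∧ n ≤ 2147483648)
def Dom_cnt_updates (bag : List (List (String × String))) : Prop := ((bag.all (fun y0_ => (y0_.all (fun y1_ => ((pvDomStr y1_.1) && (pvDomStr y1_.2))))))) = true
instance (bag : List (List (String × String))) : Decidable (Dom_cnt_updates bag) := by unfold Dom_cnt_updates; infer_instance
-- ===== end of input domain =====

-- B counts by divide-and-conquer (split the bag in half, recurse, add sub-counts) instead of A's linear two-accumulator pass (alternative; same cost).


-- ===== PORT A =====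
-- Port of A: one pass, two scalar accumulators, if/elif on the looked-up value.
def cnt_updates (bag : List (List (String × String))) : Int × Int :=
  bag.foldl (fun cf e =>
    match (PySem.Dict.mk e).get? "update" with
    | some u => if u = "c" then (cf.1 + 1, cf.2) else if u = "f" then (cf.1, cf.2 + 1) else cf
    | none => cf)  -- Python raises KeyError here; excluded by Pre_cnt_updates
    (0, 0)

-- ===== PORT B =====
-- Port of B: divide and conquer — empty and singleton base cases, otherwise split at
-- mid = len(bag)//2 (len ≥ 0, so Python's // is Nat division here), recurse on bag[:mid]
-- and bag[mid:], add the sub-counts.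
def cnt_updates_alt : List (List (String × String)) → Int × Int
  | [] => (0, 0)
  | [e] =>
      let u := (PySem.Dict.mk e).getD "update" ""  -- KeyError on missing key; excluded by Pre_cnt_updates
      ((if u = "c" then 1 else 0), (if u = "f" then 1 else 0))
  | e1 :: e2 :: t =>
      let p1 := cnt_updates_alt (PySem.List.slice (e1 :: e2 :: t) none (some (((e1 :: e2 :: t).length / 2 : Nat) : Int)))
      let p2 := cnt_updates_alt (PySem.List.slice (e1 :: e2 :: t) (some (((e1 :: e2 :: t).length / 2 : Nat) : Int)) none)
      (p1.1 + p2.1, p1.2 + p2.2)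
  termination_by bag => bag.length
  decreasing_by
  · rw [PySem.List.slice_to_natCast]; simp; omega
  · rw [PySem.List.slice_from_natCast]; simp; omega

-- ===== PRECONDITION & SPEC =====
-- Pre_: every element has an "update" key (else both Pythons raise KeyError).
def Pre_cnt_updates (bag : List (List (String × String))) : Prop :=
  ∀ e ∈ bag, ((PySem.Dict.mk e).get? "update").isSome
instance (bag : List (List (String × String))) : Decidable (Pre_cnt_updates bag) := by
  unfold Pre_cnt_updates; infer_instance
def pvWitness_cnt_updates : (List (List (String × String))) :=
  [[("update", "c")], [("update", "f"), ("x", "y")], [("update", "q")]]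

def Spec_cnt_updates (bag : List (List (String × String))) (out : Int × Int) : Prop := out = cnt_updates_alt bag
instance (bag : List (List (String × String))) (out : Int × Int) : Decidable (Spec_cnt_updates bag out) := by unfold Spec_cnt_updates; infer_instance

-- ===== CLAIM (what is proved, stated in full; the proofs are below) =====
def Claim_equal_cnt_updates : Prop := ∀ (bag : List (List (String × String))), Dom_cnt_updates bag → Pre_cnt_updates bag → Spec_cnt_updates bag (cnt_updates bag)

-- ===== LEMMAS AND PROOFS =====

-- Shared characterisation target: counts of "c" and "f" among the looked-up values.
def pvUpd (e : List (String × String)) : String := (PySem.Dict.mk e).getD "update" ""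

-- B computes the counts of "c" and "f" among the looked-up values (unconditionally).
lemma alt_eq_counts (bag : List (List (String × String))) :
    cnt_updates_alt bag
      = (((bag.map pvUpd).count "c" : Int), ((bag.map pvUpd).count "f" : Int)) := by
  induction bag using cnt_updates_alt.induct with
  | case1 => simp [cnt_updates_alt]
  | case2 e =>
      simp only [cnt_updates_alt, List.map, List.count_cons, List.count_nil, pvUpd]
      by_cases hc : (PySem.Dict.mk e).getD "update" "" = "c" <;>
        by_cases hf : (PySem.Dict.mk e).getD "update" "" = "f" <;>
        simp_all [beq_iff_eq]
  | case3 e1 e2 t ih1 ih2 =>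
      simp only [PySem.List.slice_to_natCast, PySem.List.slice_from_natCast,
        List.length_cons] at ih1 ih2
      have h : List.map pvUpd (e1 :: e2 :: t)
          = List.map pvUpd ((e1 :: e2 :: t).take ((t.length + 1 + 1) / 2))
            ++ List.map pvUpd ((e1 :: e2 :: t).drop ((t.length + 1 + 1) / 2)) := by
        rw [← List.map_append, List.take_append_drop]
      rw [cnt_updates_alt]
      simp only [PySem.List.slice_to_natCast, PySem.List.slice_from_natCast,
        List.length_cons, ih1, ih2, Prod.ext_iff]
      constructor <;> rw [← Nat.cast_add, ← List.count_append, ← h]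

-- On inputs satisfying Pre_, A's loop accumulates exactly those counts.
lemma loop_eq_counts (bag : List (List (String × String))) (c f : Int)
    (h : ∀ e ∈ bag, ((PySem.Dict.mk e).get? "update").isSome) :
    bag.foldl (fun cf e =>
      match (PySem.Dict.mk e).get? "update" with
      | some u => if u = "c" then (cf.1 + 1, cf.2) else if u = "f" then (cf.1, cf.2 + 1) else cf
      | none => cf) (c, f)
    = (c + ((bag.map pvUpd).count "c" : Int),
       f + ((bag.map pvUpd).count "f" : Int)) := by
  induction bag generalizing c f with
  | nil => simp
  | cons e t ih =>
      obtain ⟨u, hu⟩ := Option.isSome_iff_exists.mp (h e (List.mem_cons_self ..))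
      have hg : pvUpd e = u := by simp [pvUpd, PySem.Dict.getD, hu]
      simp only [List.foldl_cons, List.map_cons, hu, hg]
      rw [ih _ _ (fun e' he' => h e' (List.mem_cons_of_mem _ he'))]
      by_cases hc : u = "c" <;> by_cases hf : u = "f" <;>
        simp_all <;> ring

-- ===== VERDICT (by name: the statement is the Claim_ definition above) =====
theorem cnt_updates_spec : Claim_equal_cnt_updates := by
  intro bag _ hpre
  unfold Spec_cnt_updates
  rw [alt_eq_counts]
  unfold cnt_updates
  rw [loop_eq_counts bag 0 0 hpre]
  simp
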